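-- pv_equiv track=rewrite | github.com/shyam1220/RomanEducation | app.py | get_course_image_by_title
-- ===== SOURCE A (Python) =====
-- def get_course_image_by_title(title):
--     """
--     Get an appropriate image for a course based on keywords in its title.
--     """
--     title = title.lower() if title else ""
--
--     # Programming languages
--     if any(keyword in title for keyword in ["startertrack"]):
--         return "/static/images/courses/startertrack.webp"
--
--     # Web development
--     elif any(keyword in title for keyword in ["launchpro"]):
--         return "/static/images/courses/launchpro.jpg"
--
--     # Data science
--     elif any(keyword in title for keyword in ["careerboost"]):
--         return "/static/images/courses/careerboost.avif"
--
--     # Design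
--     elif any(keyword in title for keyword in ["devpath"]):
--         return "/static/images/courses/fullstack.png"
--
--     # Business
--     elif any(keyword in title for keyword in ["prosuite"]):
--         return "/static/images/courses/prosuit.jpg"
--
--     # Language learning
--     elif any(keyword in title for keyword in ["language", "english", "spanish", "french", "german",
--                                              "japanese", "chinese", "italian"]):
--         return "/static/images/courses/language.jpg"
--
--
--
--     # Default image if no specific category is matched
--     else:
--         return "/static/images/courses/careerboost.jpg"
-- ===== SOURCE B (Python) =====
-- # Different algorithm: instead of testing each keyword with `in` per branch,
-- # scan the title positions once and keep the minimum-priority keyword that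
-- # starts at any position; the branch order of A equals the priority order,
-- # so the minimum matched priority selects the same image.
-- _KEYWORD_PRIORITY = {
--     "startertrack": 0,
--     "launchpro": 1,
--     "careerboost": 2,
--     "devpath": 3,
--     "prosuite": 4,
--     "language": 5, "english": 5, "spanish": 5, "french": 5,
--     "german": 5, "japanese": 5, "chinese": 5, "italian": 5,
-- }
-- _PATHS = [
--     "/static/images/courses/startertrack.webp",
--     "/static/images/courses/launchpro.jpg",
--     "/static/images/courses/careerboost.avif",
--     "/static/images/courses/fullstack.png",
--     "/static/images/courses/prosuit.jpg",
--     "/static/images/courses/language.jpg",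
--     "/static/images/courses/careerboost.jpg",  # default
-- ]
--
--
-- def get_course_image_by_title(title):
--     """Get an appropriate image for a course based on keywords in its title."""
--     title = title.lower() if title else ""
--     best = 6  # index of the default image
--     for i in range(len(title)):
--         for kw, pr in _KEYWORD_PRIORITY.items():
--             if pr < best and title.startswith(kw, i):
--                 best = pr
--     return _PATHS[best]
-- ===== Notes on version B (the rewrite author's own statement) =====
-- stated objective: alternative
-- what changed: Replaced the per-branch substring tests (`keyword in title` cascade) by a single positional scan of the title that at each index checks which keyword starts there and keeps the minimum priority; the answer is then a table lookup by that priority.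
import Mathlib
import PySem

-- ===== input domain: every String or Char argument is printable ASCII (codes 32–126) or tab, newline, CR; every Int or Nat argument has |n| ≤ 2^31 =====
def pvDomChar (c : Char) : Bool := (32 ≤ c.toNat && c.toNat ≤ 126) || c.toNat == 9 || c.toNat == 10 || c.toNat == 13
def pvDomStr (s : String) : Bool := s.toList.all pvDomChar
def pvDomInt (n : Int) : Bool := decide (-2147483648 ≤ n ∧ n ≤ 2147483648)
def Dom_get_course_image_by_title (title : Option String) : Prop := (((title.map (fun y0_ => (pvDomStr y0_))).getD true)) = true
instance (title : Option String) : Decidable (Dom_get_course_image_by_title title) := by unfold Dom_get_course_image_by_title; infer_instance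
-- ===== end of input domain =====

-- B replaces A's per-branch `keyword in title` cascade by one positional scan of the title
-- keeping the minimum-priority keyword that starts at any index; objective: alternative.


-- ===== PORT A =====
def get_course_image_by_title (title : Option String) : String :=
  -- title = title.lower() if title else ""  (None and "" are falsy)
  let t : String := match title with
    | none => ""
    | some s => if s.length ≠ 0 then PySem.Str.lower s else ""
  if (["startertrack"]).any (fun k => PySem.Str.isIn k t) then
    "/static/images/courses/startertrack.webp"
  else if (["launchpro"]).any (fun k => PySem.Str.isIn k t) then
    "/static/images/courses/launchpro.jpg"
  else if (["careerboost"]).any (fun k => PySem.Str.isIn k t) then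
    "/static/images/courses/careerboost.avif"
  else if (["devpath"]).any (fun k => PySem.Str.isIn k t) then
    "/static/images/courses/fullstack.png"
  else if (["prosuite"]).any (fun k => PySem.Str.isIn k t) then
    "/static/images/courses/prosuit.jpg"
  else if (["language", "english", "spanish", "french", "german",
            "japanese", "chinese", "italian"]).any (fun k => PySem.Str.isIn k t) then
    "/static/images/courses/language.jpg"
  else
    "/static/images/courses/careerboost.jpg"

-- ===== PORT B =====
-- the dict _KEYWORD_PRIORITY of Source B, in insertion order (keywords as char lists)
def pvKw : List (List Char × Nat) :=
  [ ("startertrack".toList, 0),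
    ("launchpro".toList, 1),
    ("careerboost".toList, 2),
    ("devpath".toList, 3),
    ("prosuite".toList, 4),
    ("language".toList, 5), ("english".toList, 5), ("spanish".toList, 5),
    ("french".toList, 5), ("german".toList, 5), ("japanese".toList, 5),
    ("chinese".toList, 5), ("italian".toList, 5) ]

-- the list _PATHS of Source B (index 6 = default image)
def pvPaths : List String :=
  [ "/static/images/courses/startertrack.webp",
    "/static/images/courses/launchpro.jpg",
    "/static/images/courses/careerboost.avif",
    "/static/images/courses/fullstack.png",
    "/static/images/courses/prosuit.jpg",
    "/static/images/courses/language.jpg",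
    "/static/images/courses/careerboost.jpg" ]

-- inner loop of Source B: `for kw, pr in _KEYWORD_PRIORITY.items(): if pr < best and title.startswith(kw, i): best = pr`
-- (with 0 ≤ i, Python's t.startswith(kw, i) is exactly: kw is a prefix of t[i:], i.e. of t.drop i)
def pvInner (t : List Char) (i : Nat) (best : Nat) : Nat :=
  pvKw.foldl (fun b kp =>
    if kp.2 < b ∧ PySem.Chars.startswith (t.drop i) kp.1 then kp.2 else b) best

-- outer loop of Source B: `for i in range(len(title))` (len ≥ 0, so range(len) is List.range)
def pvBest (t : List Char) : Nat :=
  (List.range t.length).foldl (fun b i => pvInner t i b) 6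

def get_course_image_by_title_alt (title : Option String) : String :=
  let t : String := match title with
    | none => ""
    | some s => if s.length ≠ 0 then PySem.Str.lower s else ""
  pvPaths.getD (pvBest t.toList) ""   -- _PATHS[best]; best ≤ 6 always, so the lookup is in range

-- ===== PRECONDITION & SPEC =====
def Spec_get_course_image_by_title (title : Option String) (out : String) : Prop := out = get_course_image_by_title_alt title
instance (title : Option String) (out : String) : Decidable (Spec_get_course_image_by_title title out) := by unfold Spec_get_course_image_by_title; infer_instance

-- ===== CLAIM (what is proved, stated in full; the proofs are below) =====
def Claim_equal_get_course_image_by_title : Prop := ∀ (title : Option String), Dom_get_course_image_by_title title → Spec_get_course_image_by_title title (get_course_image_by_title title)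

-- ===== LEMMAS AND PROOFS =====

-- the inner fold never increases best, returns best or the priority of a keyword starting at i,
-- and is ≤ the priority of every keyword starting at i (general table, induction over it)
theorem fold_min_char (t : List Char) (i : Nat) :
    ∀ (tb : List (List Char × Nat)) (b : Nat),
    (tb.foldl (fun b kp => if kp.2 < b ∧ PySem.Chars.startswith (t.drop i) kp.1 then kp.2 else b) b) ≤ b ∧
    ((tb.foldl (fun b kp => if kp.2 < b ∧ PySem.Chars.startswith (t.drop i) kp.1 then kp.2 else b) b) = b ∨
      ∃ kp ∈ tb, PySem.Chars.startswith (t.drop i) kp.1 = true ∧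
        (tb.foldl (fun b kp => if kp.2 < b ∧ PySem.Chars.startswith (t.drop i) kp.1 then kp.2 else b) b) = kp.2) ∧
    (∀ kp ∈ tb, PySem.Chars.startswith (t.drop i) kp.1 = true →
      (tb.foldl (fun b kp => if kp.2 < b ∧ PySem.Chars.startswith (t.drop i) kp.1 then kp.2 else b) b) ≤ kp.2) := by
  intro tb
  induction tb with
  | nil => intro b; simp
  | cons kp rest ih =>
    intro b
    simp only [List.foldl_cons]
    by_cases h : kp.2 < b ∧ PySem.Chars.startswith (t.drop i) kp.1
    · simp only [if_pos h]
      obtain ⟨h1, h2, h3⟩ := ih kp.2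
      refine ⟨by omega, ?_, ?_⟩
      · rcases h2 with h2 | ⟨kq, hkq, hs, he⟩
        · exact Or.inr ⟨kp, by simp, h.2, h2⟩
        · exact Or.inr ⟨kq, by simp [hkq], hs, he⟩
      · intro kq hkq hs
        rcases List.mem_cons.mp hkq with rfl | hkq
        · omega
        · exact h3 kq hkq hs
    · simp only [if_neg h]
      obtain ⟨h1, h2, h3⟩ := ih b
      refine ⟨h1, ?_, ?_⟩
      · rcases h2 with h2 | ⟨kq, hkq, hs, he⟩
        · exact Or.inl h2
        · exact Or.inr ⟨kq, by simp [hkq], hs, he⟩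
      · intro kq hkq hs
        rcases List.mem_cons.mp hkq with rfl | hkq
        · rw [Classical.not_and_iff_not_or_not] at h
          rcases h with h | h
          · omega
          · exact absurd hs h
        · exact h3 kq hkq hs

theorem pvInner_char (t : List Char) (i : Nat) (b : Nat) :
    pvInner t i b ≤ b ∧
    (pvInner t i b = b ∨ ∃ kp ∈ pvKw, PySem.Chars.startswith (t.drop i) kp.1 = true ∧ pvInner t i b = kp.2) ∧
    (∀ kp ∈ pvKw, PySem.Chars.startswith (t.drop i) kp.1 = true → pvInner t i b ≤ kp.2) :=
  fold_min_char t i pvKw b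

-- the outer fold: same characterization, over all scanned positions
theorem pvPos_char (t : List Char) :
    ∀ (L : List Nat) (b : Nat),
    (L.foldl (fun b i => pvInner t i b) b) ≤ b ∧
    ((L.foldl (fun b i => pvInner t i b) b) = b ∨
      ∃ kp ∈ pvKw, ∃ i ∈ L, PySem.Chars.startswith (t.drop i) kp.1 = true ∧
        (L.foldl (fun b i => pvInner t i b) b) = kp.2) ∧
    (∀ kp ∈ pvKw, ∀ i ∈ L, PySem.Chars.startswith (t.drop i) kp.1 = true →
      (L.foldl (fun b i => pvInner t i b) b) ≤ kp.2) := by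
  intro L
  induction L with
  | nil => intro b; simp
  | cons j rest ih =>
    intro b
    simp only [List.foldl_cons]
    obtain ⟨h1, h2, h3⟩ := ih (pvInner t j b)
    obtain ⟨g1, g2, g3⟩ := pvInner_char t j b
    refine ⟨by omega, ?_, ?_⟩
    · rcases h2 with h2 | ⟨kp, hkp, i, hi, hs, he⟩
      · rw [h2]
        rcases g2 with g2 | ⟨kp, hkp, hs, he⟩
        · exact Or.inl g2
        · exact Or.inr ⟨kp, hkp, j, by simp, hs, he⟩
      · exact Or.inr ⟨kp, hkp, i, by simp [hi], hs, he⟩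
    · intro kp hkp i hi hs
      rcases List.mem_cons.mp hi with rfl | hi
      · exact le_trans h1 (g3 kp hkp hs)
      · exact h3 kp hkp i hi hs

theorem pvKw_nonempty : ∀ kp ∈ pvKw, kp.1 ≠ [] := by decide

-- pvBest t = p whenever p is ≤ 6, is 6 or the priority of a keyword occurring in t,
-- and is ≤ the priority of every keyword occurring in t
theorem pvBest_eq (t : List Char) (p : Nat) (hp : p ≤ 6)
    (hm : p = 6 ∨ ∃ kw, (kw, p) ∈ pvKw ∧ PySem.Chars.isIn kw t = true)
    (hmin : ∀ kp ∈ pvKw, PySem.Chars.isIn kp.1 t = true → p ≤ kp.2) :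
    pvBest t = p := by
  obtain ⟨h1, h2, h3⟩ := pvPos_char t (List.range t.length) 6
  unfold pvBest
  have hge : p ≤ (List.range t.length).foldl (fun b i => pvInner t i b) 6 := by
    rcases h2 with h2 | ⟨kp, hkp, i, hi, hs, he⟩
    · omega
    · rw [he]
      apply hmin kp hkp
      rw [← PySem.Chars.exists_prefix_drop_iff_isIn]
      exact ⟨i, (PySem.Chars.startswith_iff _ _).mp hs⟩
  have hle : (List.range t.length).foldl (fun b i => pvInner t i b) 6 ≤ p := by
    rcases hm with rfl | ⟨kw, hkw, hin⟩
    · exact h1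
    · rw [← PySem.Chars.exists_prefix_drop_iff_isIn] at hin
      obtain ⟨j, hj⟩ := hin
      have hne : kw ≠ [] := pvKw_nonempty _ hkw
      have hjlt : j < t.length := by
        by_contra hge'
        rw [List.drop_eq_nil_iff.mpr (by omega)] at hj
        exact hne (List.prefix_nil.mp hj)
      exact h3 (kw, p) hkw j (List.mem_range.mpr hjlt) ((PySem.Chars.startswith_iff _ _).mpr hj)
  omega

-- A's cascade on the lowered title equals B's table lookup at the minimum matched priority
theorem pvKey (t : String) :
    (if (["startertrack"]).any (fun k => PySem.Str.isIn k t) then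
      "/static/images/courses/startertrack.webp"
    else if (["launchpro"]).any (fun k => PySem.Str.isIn k t) then
      "/static/images/courses/launchpro.jpg"
    else if (["careerboost"]).any (fun k => PySem.Str.isIn k t) then
      "/static/images/courses/careerboost.avif"
    else if (["devpath"]).any (fun k => PySem.Str.isIn k t) then
      "/static/images/courses/fullstack.png"
    else if (["prosuite"]).any (fun k => PySem.Str.isIn k t) then
      "/static/images/courses/prosuit.jpg"
    else if (["language", "english", "spanish", "french", "german",
              "japanese", "chinese", "italian"]).any (fun k => PySem.Str.isIn k t) then
      "/static/images/courses/language.jpg"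
    else
      "/static/images/courses/careerboost.jpg")
    = pvPaths.getD (pvBest t.toList) "" := by
  simp only [List.any_cons, List.any_nil, Bool.or_false, PySem.Str.isIn_eq]
  by_cases h0 : PySem.Chars.isIn "startertrack".toList t.toList = true
  · rw [pvBest_eq t.toList 0 (by omega) (Or.inr ⟨_, by decide, h0⟩)
      (fun kp _ _ => Nat.zero_le _)]
    simp_all [pvPaths]
  · rw [Bool.not_eq_true] at h0
    by_cases h1 : PySem.Chars.isIn "launchpro".toList t.toList = true
    · rw [pvBest_eq t.toList 1 (by omega) (Or.inr ⟨_, by decide, h1⟩) ?_]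
      · simp_all [pvPaths]
      · intro kp hkp hin
        simp only [pvKw, List.mem_cons, List.not_mem_nil, or_false] at hkp
        rcases hkp with rfl|rfl|rfl|rfl|rfl|rfl|rfl|rfl|rfl|rfl|rfl|rfl|rfl <;>
          first | omega | simp_all
    · rw [Bool.not_eq_true] at h1
      by_cases h2 : PySem.Chars.isIn "careerboost".toList t.toList = true
      · rw [pvBest_eq t.toList 2 (by omega) (Or.inr ⟨_, by decide, h2⟩) ?_]
        · simp_all [pvPaths]
        · intro kp hkp hin
          simp only [pvKw, List.mem_cons, List.not_mem_nil, or_false] at hkp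
          rcases hkp with rfl|rfl|rfl|rfl|rfl|rfl|rfl|rfl|rfl|rfl|rfl|rfl|rfl <;>
            first | omega | simp_all
      · rw [Bool.not_eq_true] at h2
        by_cases h3 : PySem.Chars.isIn "devpath".toList t.toList = true
        · rw [pvBest_eq t.toList 3 (by omega) (Or.inr ⟨_, by decide, h3⟩) ?_]
          · simp_all [pvPaths]
          · intro kp hkp hin
            simp only [pvKw, List.mem_cons, List.not_mem_nil, or_false] at hkp
            rcases hkp with rfl|rfl|rfl|rfl|rfl|rfl|rfl|rfl|rfl|rfl|rfl|rfl|rfl <;>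
              first | omega | simp_all
        · rw [Bool.not_eq_true] at h3
          by_cases h4 : PySem.Chars.isIn "prosuite".toList t.toList = true
          · rw [pvBest_eq t.toList 4 (by omega) (Or.inr ⟨_, by decide, h4⟩) ?_]
            · simp_all [pvPaths]
            · intro kp hkp hin
              simp only [pvKw, List.mem_cons, List.not_mem_nil, or_false] at hkp
              rcases hkp with rfl|rfl|rfl|rfl|rfl|rfl|rfl|rfl|rfl|rfl|rfl|rfl|rfl <;>
                first | omega | simp_all
          · rw [Bool.not_eq_true] at h4
            by_cases h5 : (PySem.Chars.isIn "language".toList t.toList ||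
                PySem.Chars.isIn "english".toList t.toList ||
                PySem.Chars.isIn "spanish".toList t.toList ||
                PySem.Chars.isIn "french".toList t.toList ||
                PySem.Chars.isIn "german".toList t.toList ||
                PySem.Chars.isIn "japanese".toList t.toList ||
                PySem.Chars.isIn "chinese".toList t.toList ||
                PySem.Chars.isIn "italian".toList t.toList) = true
            · have hm : ∃ kw, (kw, 5) ∈ pvKw ∧ PySem.Chars.isIn kw t.toList = true := by
                simp only [Bool.or_eq_true] at h5
                rcases h5 with ((((((h|h)|h)|h)|h)|h)|h)|h <;> exact ⟨_, by decide, h⟩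
              rw [pvBest_eq t.toList 5 (by omega) (Or.inr hm) ?_]
              · simp only [Bool.or_eq_true] at h5
                rcases h5 with ((((((h|h)|h)|h)|h)|h)|h)|h <;> simp_all [pvPaths]
              · intro kp hkp hin
                simp only [pvKw, List.mem_cons, List.not_mem_nil, or_false] at hkp
                rcases hkp with rfl|rfl|rfl|rfl|rfl|rfl|rfl|rfl|rfl|rfl|rfl|rfl|rfl <;>
                  first | omega | simp_all
            · rw [Bool.not_eq_true] at h5
              simp only [Bool.or_eq_false_iff] at h5
              obtain ⟨⟨⟨⟨⟨⟨⟨g0, g1⟩, g2⟩, g3⟩, g4⟩, g5⟩, g6⟩, g7⟩ := h5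
              rw [pvBest_eq t.toList 6 (by omega) (Or.inl rfl) ?_]
              · simp_all [pvPaths]
              · intro kp hkp hin
                simp only [pvKw, List.mem_cons, List.not_mem_nil, or_false] at hkp
                rcases hkp with rfl|rfl|rfl|rfl|rfl|rfl|rfl|rfl|rfl|rfl|rfl|rfl|rfl <;> simp_all

-- ===== VERDICT (by name: the statement is the Claim_ definition above) =====
theorem get_course_image_by_title_spec : Claim_equal_get_course_image_by_title := by
  intro title _
  unfold Spec_get_course_image_by_title get_course_image_by_title get_course_image_by_title_alt
  exact pvKey _
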